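-- pv_equiv track=rewrite | github.com/EAFIT-AACS/assigment1-athina-cappelletti-simon-tovar | Taller1 -.py | obtener_estados_accesibles
-- ===== SOURCE A (Python) =====
-- def obtener_estados_accesibles(n, transiciones):
--     """Obtiene los estados accesibles desde el estado inicial (0)."""
--     accesibles = set()  # Conjunto de estados accesibles.
--     pendientes = {0}  # Conjunto de estados por explorar, comenzando desde el estado inicial (0).
--
--     while pendientes:  # Mientras haya estados pendientes de explorar.
--         estado = pendientes.pop()  # Obtiene y elimina un estado del conjunto de pendientes.
--         if estado in accesibles:  # Si el estado ya fue visitado, lo ignora.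
--             continue
--         accesibles.add(estado)  # Marca el estado como accesible.
--         # Añade a pendientes los estados a los que se puede llegar desde el estado actual.
--         for destino in transiciones.get(estado, {}).values():
--             if destino not in accesibles:  # Solo añade estados no visitados.
--                 pendientes.add(destino)
--
--     return accesibles  # Retorna el conjunto de estados accesibles.
-- ===== SOURCE B (Python) =====
-- def obtener_estados_accesibles(n, transiciones):
--     """Obtiene los estados accesibles desde el estado inicial (0) por
--     iteracion de punto fijo: en cada ronda calcula la imagen de TODO el
--     conjunto actual y agrega lo nuevo, hasta estabilizar."""
--     accesibles = {0}
--     while True: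
--         imagen = {destino for estado in accesibles
--                   for destino in transiciones.get(estado, {}).values()}
--         nuevos = imagen - accesibles
--         if not nuevos:
--             return accesibles
--         accesibles |= nuevos
-- ===== Notes on version B (the rewrite author's own statement) =====
-- stated objective: alternative
-- what changed: Replaces the one-state-at-a-time worklist (pendientes set with pop and per-state marking) by a round-based fixpoint iteration that recomputes the image of the whole current set each round and unions in the new states until nothing changes.
import Mathlib
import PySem

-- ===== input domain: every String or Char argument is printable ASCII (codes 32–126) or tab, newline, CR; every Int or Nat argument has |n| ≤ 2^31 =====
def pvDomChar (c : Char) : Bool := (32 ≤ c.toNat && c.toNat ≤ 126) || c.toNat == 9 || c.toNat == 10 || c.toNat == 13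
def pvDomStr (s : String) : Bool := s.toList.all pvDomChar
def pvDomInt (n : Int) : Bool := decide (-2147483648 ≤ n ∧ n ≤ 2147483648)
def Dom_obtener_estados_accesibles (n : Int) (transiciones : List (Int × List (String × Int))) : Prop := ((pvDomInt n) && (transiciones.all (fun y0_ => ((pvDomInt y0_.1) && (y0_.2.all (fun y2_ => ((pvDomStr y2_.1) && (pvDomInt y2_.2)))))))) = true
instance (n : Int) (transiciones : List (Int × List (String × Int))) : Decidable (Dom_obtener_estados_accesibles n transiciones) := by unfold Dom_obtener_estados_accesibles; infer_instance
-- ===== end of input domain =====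

-- ===== PORT A =====
-- B reimplements A's worklist reachability as a round-based fixpoint iteration ("alternative": different algorithm, similar cost).
-- Both programs return a Python set; set outputs are compared as finite sets, and the reachable set does not depend on the
-- arbitrary order in which `pendientes.pop()` hands out elements, so the port models pop as taking the first-inserted element.

-- transiciones.get(estado, {}).values() — shared expression of both Pythons
def pvDests (t : List (Int × List (String × Int))) (e : Int) : List Int :=
  ((PySem.Dict.mk t).getD e []).map Prod.snd

-- all destination states occurring anywhere in transiciones (used only for termination measures)
def pvUniv (t : List (Int × List (String × Int))) : List Int :=
  t.flatMap (fun p => p.2.map Prod.snd)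

theorem pvDests_subset_univ (t : List (Int × List (String × Int))) (e : Int) :
    ∀ x ∈ pvDests t e, x ∈ pvUniv t := by
  induction t with
  | nil => intro x hx; simp [pvDests, PySem.Dict.getD, PySem.Dict.get?] at hx
  | cons p rest ih =>
      intro x hx
      simp only [pvDests, PySem.Dict.getD] at hx ih
      rw [PySem.Dict.get?_mk_cons] at hx
      simp only [pvUniv, List.flatMap_cons, List.mem_append]
      by_cases h : (p.1 == e) = true
      · rw [if_pos h] at hx
        exact Or.inl (by simpa using hx)
      · rw [if_neg h] at hx
        exact Or.inr (ih x hx)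

theorem pvFold_add_mem (g : Int → Bool) (ds : List Int) (P : List Int) (x : Int)
    (hx : x ∈ ds.foldl (fun P d => if g d then P else PySem.Set.add P d) P) :
    x ∈ P ∨ x ∈ ds := by
  induction ds generalizing P with
  | nil => exact Or.inl hx
  | cons d ds ih =>
      simp only [List.foldl_cons] at hx
      rcases ih _ hx with h | h
      · by_cases hg : g d = true
        · rw [if_pos hg] at h; exact Or.inl h
        · rw [if_neg hg] at h
          simp only [PySem.Set.add] at h
          by_cases hc : PySem.Set.contains P d = true
          · rw [if_pos hc] at h; exact Or.inl h
          · rw [if_neg hc] at h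
            rcases List.mem_append.1 h with h | h
            · exact Or.inl h
            · simp only [List.mem_singleton] at h
              subst h; exact Or.inr (List.mem_cons_self ..)
      · exact Or.inr (List.mem_cons_of_mem _ h)

-- Port of A: the while-loop over (accesibles, pendientes); pop takes the first-inserted pending state.
def pvLoopA (t : List (Int × List (String × Int))) (acc pend : List Int) : List Int :=
  match hp : pend with
  | [] => acc
  | estado :: rest =>
      if hv : acc.contains estado then
        pvLoopA t acc rest
      else
        pvLoopA t (PySem.Set.add acc estado) ((pvDests t estado).foldl
          (fun P d => if PySem.Set.contains (PySem.Set.add acc estado) d then P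
                      else PySem.Set.add P d) rest)
  termination_by (((pvUniv t ++ pend).toFinset \ acc.toFinset).card, pend.length)
  decreasing_by
  · apply Prod.Lex.right'
    · apply Finset.card_le_card
      apply Finset.sdiff_subset_sdiff _ (Finset.Subset.refl _)
      intro x hx
      simp only [List.toFinset_append, Finset.mem_union, List.mem_toFinset] at hx ⊢
      rcases hx with h | h
      · exact Or.inl h
      · exact Or.inr (List.mem_cons_of_mem _ h)
    · simp
  · apply Prod.Lex.left
    apply Finset.card_lt_card
    constructor
    · intro x hx
      simp only [Finset.mem_sdiff, List.toFinset_append, Finset.mem_union, List.mem_toFinset] at hx ⊢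
      obtain ⟨hx1, hx2⟩ := hx
      refine ⟨?_, fun hc => hx2 ?_⟩
      · rcases hx1 with h | h
        · exact Or.inl h
        · rcases pvFold_add_mem _ _ _ _ h with h | h
          · exact Or.inr (List.mem_cons_of_mem _ h)
          · exact Or.inl (pvDests_subset_univ t estado x h)
      · simp only [PySem.Set.add]
        split <;> simp [hc]
    · intro hsub
      have h1 : estado ∈ (pvUniv t ++ estado :: rest).toFinset \ acc.toFinset := by
        simp only [Finset.mem_sdiff, List.toFinset_append, Finset.mem_union, List.mem_toFinset]
        exact ⟨Or.inr (List.mem_cons_self ..), by simpa using hv⟩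
      have h2 := hsub h1
      simp only [Finset.mem_sdiff, List.mem_toFinset] at h2
      exact h2.2 (by simp [PySem.Set.add, List.contains_eq_mem, (by simpa using hv : estado ∉ acc)])

def obtener_estados_accesibles (n : Int) (transiciones : List (Int × List (String × Int))) : List Int :=
  pvLoopA transiciones [] [0]

-- ===== PORT B =====
-- Port of B: accesibles = {0}; each round recomputes the image of the whole set, unions in the new states, stops when none.
-- nuevos = imagen - accesibles, with imagen the set comprehension over all of accesibles
def pvNuevos (t : List (Int × List (String × Int))) (acc : List Int) : List Int :=
  PySem.Set.diff (PySem.Set.ofList (acc.flatMap (pvDests t))) acc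

def pvLoopB (t : List (Int × List (String × Int))) (acc : List Int) : List Int :=
  if hn : (pvNuevos t acc).isEmpty then acc else pvLoopB t (PySem.Set.union acc (pvNuevos t acc))
  termination_by ((pvUniv t).toFinset \ acc.toFinset).card
  decreasing_by
  apply Finset.card_lt_card
  have hne : pvNuevos t acc ≠ [] := by simpa [List.isEmpty_iff] using hn
  obtain ⟨w, hw⟩ := List.exists_mem_of_ne_nil _ hne
  have hwd : w ∈ (acc.flatMap (pvDests t)) ∧ w ∉ acc := by
    have h3 : w ∈ (PySem.Set.ofList (acc.flatMap (pvDests t))).filter (fun x => !acc.contains x) := hw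
    simp only [List.mem_filter, Bool.not_eq_eq_eq_not, Bool.not_true, List.contains_eq_mem,
      decide_eq_false_iff_not] at h3
    exact ⟨(PySem.Set.mem_ofList _ _).1 h3.1, h3.2⟩
  constructor
  · intro x hx
    simp only [Finset.mem_sdiff, List.mem_toFinset] at hx ⊢
    exact ⟨hx.1, fun hc => hx.2 ((PySem.Set.mem_union _ _ _).2 (Or.inl hc))⟩
  · intro hsub
    have hwu : w ∈ pvUniv t := by
      obtain ⟨e, _, hd⟩ := List.mem_flatMap.1 hwd.1
      exact pvDests_subset_univ t e w hd
    have h2 := hsub (by simp only [Finset.mem_sdiff, List.mem_toFinset]; exact ⟨hwu, hwd.2⟩)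
    simp only [Finset.mem_sdiff, List.mem_toFinset] at h2
    exact h2.2 ((PySem.Set.mem_union _ _ _).2 (Or.inr hw))

def obtener_estados_accesibles_alt (n : Int) (transiciones : List (Int × List (String × Int))) : List Int :=
  pvLoopB transiciones (PySem.Set.ofList [0])

-- ===== PRECONDITION & SPEC =====
def Spec_obtener_estados_accesibles (n : Int) (transiciones : List (Int × List (String × Int))) (out : List Int) : Prop := out = obtener_estados_accesibles_alt n transiciones
instance (n : Int) (transiciones : List (Int × List (String × Int))) (out : List Int) : Decidable (Spec_obtener_estados_accesibles n transiciones out) := by unfold Spec_obtener_estados_accesibles; infer_instance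

-- ===== CLAIM (what is proved, stated in full; the proofs are below) =====
def Claim_equal_obtener_estados_accesibles : Prop := ∀ (n : Int) (transiciones : List (Int × List (String × Int))), Dom_obtener_estados_accesibles n transiciones → Spec_obtener_estados_accesibles n transiciones (obtener_estados_accesibles n transiciones)

-- ===== LEMMAS AND PROOFS =====

-- canonical "append the not-yet-seen destinations" accumulator both loops reduce to
def pvAcc1 (S P ds : List Int) : List Int :=
  ds.foldl (fun P d => if d ∈ S ∨ d ∈ P then P else P ++ [d]) P

theorem pvInner_eq (S : List Int) :
    (fun (P : List Int) d => if PySem.Set.contains S d then P else PySem.Set.add P d)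
      = (fun P d => if d ∈ S ∨ d ∈ P then P else P ++ [d]) := by
  funext P d
  by_cases h1 : d ∈ S
  · simp [h1, PySem.Set.contains, List.contains_eq_mem]
  · by_cases h2 : d ∈ P <;>
      simp [h1, h2, PySem.Set.add, PySem.Set.contains, List.contains_eq_mem]

theorem pvAcc1_append (S P ds1 ds2 : List Int) :
    pvAcc1 S P (ds1 ++ ds2) = pvAcc1 S (pvAcc1 S P ds1) ds2 := by
  simp [pvAcc1, List.foldl_append]

theorem pvSplit (S ds : List Int) : ∀ (X P : List Int),
    pvAcc1 S (X ++ P) ds = X ++ pvAcc1 (S ++ X) P ds := by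
  induction ds with
  | nil => intro X P; rfl
  | cons d ds ih =>
      intro X P
      simp only [pvAcc1, List.foldl_cons] at *
      by_cases hc : d ∈ S ∨ d ∈ X ∨ d ∈ P
      · rw [if_pos (by simpa [List.mem_append, or_assoc] using hc),
            if_pos (by simpa [List.mem_append, or_assoc] using hc)]
        exact ih X P
      · rw [if_neg (by simpa [List.mem_append, or_assoc] using hc),
            if_neg (by simpa [List.mem_append, or_assoc] using hc),
            List.append_assoc]
        exact ih X (P ++ [d])

theorem pvAcc1_mem (S ds : List Int) : ∀ (P : List Int) (x : Int),
    x ∈ pvAcc1 S P ds ↔ x ∈ P ∨ (x ∈ ds ∧ x ∉ S) := by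
  induction ds with
  | nil => simp [pvAcc1]
  | cons d ds ih =>
      intro P x
      simp only [pvAcc1, List.foldl_cons]
      by_cases hc : d ∈ S ∨ d ∈ P
      · rw [if_pos hc]
        rw [show List.foldl (fun P d => if d ∈ S ∨ d ∈ P then P else P ++ [d]) P ds
              = pvAcc1 S P ds from rfl, ih]
        constructor
        · rintro (h | ⟨h1, h2⟩)
          · exact Or.inl h
          · exact Or.inr ⟨List.mem_cons_of_mem _ h1, h2⟩
        · rintro (h | ⟨h1, h2⟩)
          · exact Or.inl h
          · rcases List.mem_cons.1 h1 with rfl | h1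
            · rcases hc with h | h
              · exact absurd h h2
              · exact Or.inl h
            · exact Or.inr ⟨h1, h2⟩
      · rw [if_neg hc]
        rw [show List.foldl (fun P d => if d ∈ S ∨ d ∈ P then P else P ++ [d]) (P ++ [d]) ds
              = pvAcc1 S (P ++ [d]) ds from rfl, ih]
        push Not at hc
        constructor
        · rintro (h | ⟨h1, h2⟩)
          · rcases List.mem_append.1 h with h | h
            · exact Or.inl h
            · rcases List.mem_singleton.1 h with rfl
              exact Or.inr ⟨List.mem_cons_self .., hc.1⟩
          · exact Or.inr ⟨List.mem_cons_of_mem _ h1, h2⟩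
        · rintro (h | ⟨h1, h2⟩)
          · exact Or.inl (List.mem_append.2 (Or.inl h))
          · rcases List.mem_cons.1 h1 with rfl | h1
            · exact Or.inl (List.mem_append.2 (Or.inr (List.mem_singleton.2 rfl)))
            · exact Or.inr ⟨h1, h2⟩

theorem pvAcc1_nodup (S ds : List Int) : ∀ (P : List Int),
    (S ++ P).Nodup → (S ++ pvAcc1 S P ds).Nodup := by
  induction ds with
  | nil => intro P h; exact h
  | cons d ds ih =>
      intro P h
      simp only [pvAcc1, List.foldl_cons]
      by_cases hc : d ∈ S ∨ d ∈ P
      · rw [if_pos hc]; exact ih P h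
      · rw [if_neg hc]
        apply ih (P ++ [d])
        push Not at hc
        rw [← List.append_assoc]
        apply List.Nodup.append
        · exact h
        · exact List.nodup_singleton d
        · intro a ha hb
          rcases List.mem_singleton.1 hb with rfl
          rcases List.mem_append.1 ha with h' | h'
          · exact hc.1 h'
          · exact hc.2 h'

theorem pvAcc1_filter (S ds : List Int) : ∀ (P : List Int),
    pvAcc1 S P ds = (ds.filter (fun d => !PySem.Set.contains S d)).foldl PySem.Set.add P := by
  induction ds with
  | nil => intro P; rfl
  | cons d ds ih =>
      intro P
      simp only [pvAcc1, List.foldl_cons, List.filter_cons]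
      by_cases hS : d ∈ S
      · rw [if_pos (Or.inl hS),
            if_neg (by simp [PySem.Set.contains, List.contains_eq_mem, hS])]
        exact ih P
      · rw [if_pos (show (!PySem.Set.contains S d) = true by
              simp [PySem.Set.contains, List.contains_eq_mem, hS]),
            List.foldl_cons]
        by_cases hP : d ∈ P
        · rw [if_pos (Or.inr hP),
              show PySem.Set.add P d = P by
                simp [PySem.Set.add, List.contains_eq_mem, hP]]
          exact ih P
        · rw [if_neg (by tauto),
              show PySem.Set.add P d = P ++ [d] by
                simp [PySem.Set.add, List.contains_eq_mem, hP]]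
          exact ih (P ++ [d])

theorem pvAdd_filter (p : Int → Bool) (P : List Int) (d : Int) :
    (PySem.Set.add P d).filter p
      = if p d then PySem.Set.add (P.filter p) d else P.filter p := by
  by_cases hP : d ∈ P
  · rw [show PySem.Set.add P d = P by simp [PySem.Set.add, List.contains_eq_mem, hP]]
    by_cases hp : p d = true
    · rw [if_pos hp]
      rw [show PySem.Set.add (P.filter p) d = P.filter p by
        simp [PySem.Set.add, List.contains_eq_mem, List.mem_filter, hP, hp]]
    · rw [if_neg (by simpa using hp)]
  · rw [show PySem.Set.add P d = P ++ [d] by simp [PySem.Set.add, List.contains_eq_mem, hP]]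
    by_cases hp : p d = true
    · rw [if_pos hp]
      rw [show PySem.Set.add (P.filter p) d = P.filter p ++ [d] by
        simp [PySem.Set.add, List.contains_eq_mem, List.mem_filter, hP]]
      simp [List.filter_append, hp]
    · rw [if_neg (by simpa using hp)]
      simp [List.filter_append, hp]

theorem pvFoldAdd_filter (p : Int → Bool) (L : List Int) : ∀ (P : List Int),
    (L.foldl PySem.Set.add P).filter p = (L.filter p).foldl PySem.Set.add (P.filter p) := by
  induction L with
  | nil => intro P; rfl
  | cons d L ih =>
      intro P
      simp only [List.foldl_cons, List.filter_cons]
      by_cases hp : p d = true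
      · rw [if_pos hp, List.foldl_cons, ih, pvAdd_filter, if_pos hp]
      · rw [if_neg (by simpa using hp), ih, pvAdd_filter, if_neg (by simpa using hp)]

theorem pvFilter_ofList (p : Int → Bool) (L : List Int) :
    (PySem.Set.ofList L).filter p = PySem.Set.ofList (L.filter p) := by
  rw [show PySem.Set.ofList L = L.foldl PySem.Set.add [] from rfl,
      show PySem.Set.ofList (L.filter p) = (L.filter p).foldl PySem.Set.add [] from rfl,
      pvFoldAdd_filter]
  rfl

theorem pvUnion_append (nx : List Int) : ∀ (a : List Int), nx.Nodup → (∀ x ∈ nx, x ∉ a) →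
    PySem.Set.union a nx = a ++ nx := by
  induction nx with
  | nil => intro a _ _; simp [PySem.Set.union]
  | cons x nx ih =>
      intro a hnd hdisj
      rw [show PySem.Set.union a (x :: nx) = PySem.Set.union (PySem.Set.add a x) nx from rfl]
      rw [show PySem.Set.add a x = a ++ [x] by
        simp [PySem.Set.add, List.contains_eq_mem, hdisj x (List.mem_cons_self ..)]]
      rw [ih (a ++ [x]) (List.Nodup.of_cons hnd)]
      · simp
      · intro y hy
        simp only [List.mem_append, List.mem_singleton]
        rintro (h | rfl)
        · exact hdisj y (List.mem_cons_of_mem _ hy) h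
        · exact (List.nodup_cons.1 hnd).1 hy

-- one full round of A's worklist loop
theorem pvRoundA (t : List (Int × List (String × Int))) : ∀ (F C N : List Int),
    (C ++ F ++ N).Nodup →
    pvLoopA t C (F ++ N) = pvLoopA t (C ++ F) (pvAcc1 (C ++ F) N (F.flatMap (pvDests t))) := by
  intro F
  induction F with
  | nil => intro C N _; simp [pvAcc1]
  | cons e F ih =>
      intro C N hnd
      have hnd' : (C ++ [e] ++ F ++ N).Nodup := by
        simpa [List.append_assoc, List.singleton_append] using hnd
      have heC : e ∉ C := by
        have h2 : (C ++ [e]).Nodup := (hnd'.of_append_left).of_append_left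
        simp only [List.nodup_append] at h2
        tauto
      rw [List.cons_append, pvLoopA]
      rw [dif_neg (by simpa [List.contains_eq_mem] using heC)]
      rw [show PySem.Set.add C e = C ++ [e] by
        simp [PySem.Set.add, List.contains_eq_mem, heC]]
      rw [pvInner_eq (C ++ [e])]
      rw [show ((pvDests t e).foldl (fun P d => if d ∈ C ++ [e] ∨ d ∈ P then P else P ++ [d])
            (F ++ N)) = pvAcc1 (C ++ [e]) (F ++ N) (pvDests t e) from rfl]
      rw [pvSplit]
      have hnd2 : (C ++ [e] ++ F ++ pvAcc1 (C ++ [e] ++ F) N (pvDests t e)).Nodup := by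
        have := pvAcc1_nodup (C ++ [e] ++ F) (pvDests t e) N (by
          simpa [List.append_assoc] using hnd')
        simpa [List.append_assoc] using this
      have := ih (C ++ [e]) (pvAcc1 (C ++ [e] ++ F) N (pvDests t e))
        (by simpa [List.append_assoc] using hnd2)
      rw [this]
      rw [show C ++ e :: F = C ++ [e] ++ F by simp]
      rw [List.flatMap_cons, pvAcc1_append]

-- pvNuevos computed from the whole set equals the new frontier computed from F alone
theorem pvNuevos_eq (t : List (Int × List (String × Int))) (C F : List Int)
    (hclosed : ∀ e ∈ C, ∀ d ∈ pvDests t e, d ∈ C ++ F) :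
    pvNuevos t (C ++ F) = pvAcc1 (C ++ F) [] (F.flatMap (pvDests t)) := by
  rw [show pvNuevos t (C ++ F)
        = (PySem.Set.ofList ((C ++ F).flatMap (pvDests t))).filter
            (fun x => !PySem.Set.contains (C ++ F) x) from rfl]
  rw [pvFilter_ofList, List.flatMap_append, List.filter_append]
  rw [show (C.flatMap (pvDests t)).filter (fun x => !PySem.Set.contains (C ++ F) x) = [] by
    rw [List.filter_eq_nil_iff]
    intro a ha
    obtain ⟨e, he, hd⟩ := List.mem_flatMap.1 ha
    simp [PySem.Set.contains, List.contains_eq_mem, hclosed e he a hd]]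
  rw [List.nil_append, pvAcc1_filter]
  rfl

theorem pvMain (t : List (Int × List (String × Int))) : ∀ (k : Nat) (C F : List Int),
    (((pvUniv t).toFinset \ (C ++ F).toFinset).card ≤ k) → (C ++ F).Nodup →
    (∀ e ∈ C, ∀ d ∈ pvDests t e, d ∈ C ++ F) →
    pvLoopA t C F = pvLoopB t (C ++ F) := by
  intro k
  induction k with
  | zero =>
      intro C F hk hnd hclosed
      have hNX : pvAcc1 (C ++ F) [] (F.flatMap (pvDests t)) = [] := by
        by_contra hne
        obtain ⟨x, hx⟩ := List.exists_mem_of_ne_nil _ hne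
        rcases (pvAcc1_mem _ _ _ _).1 hx with h | ⟨h1, h2⟩
        · simp at h
        · obtain ⟨e, he, hd⟩ := List.mem_flatMap.1 h1
          have hxU : x ∈ pvUniv t := pvDests_subset_univ t e x hd
          have : x ∈ (pvUniv t).toFinset \ (C ++ F).toFinset := by
            simp only [Finset.mem_sdiff, List.mem_toFinset]
            exact ⟨hxU, h2⟩
          have := Finset.card_pos.2 ⟨x, this⟩
          omega
      have hA := pvRoundA t F C [] (by simpa using hnd)
      rw [List.append_nil] at hA
      rw [hA, hNX, pvLoopA]
      rw [pvLoopB]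
      rw [dif_pos (by rw [pvNuevos_eq t C F hclosed, hNX]; rfl)]
  | succ k ih =>
      intro C F hk hnd hclosed
      have hA := pvRoundA t F C [] (by simpa using hnd)
      rw [List.append_nil] at hA
      rw [hA]
      by_cases hNX : pvAcc1 (C ++ F) [] (F.flatMap (pvDests t)) = []
      · rw [hNX, pvLoopA, pvLoopB]
        rw [dif_pos (by rw [pvNuevos_eq t C F hclosed, hNX]; rfl)]
      · set NX := pvAcc1 (C ++ F) [] (F.flatMap (pvDests t)) with hNXdef
        have hndNX : ((C ++ F) ++ NX).Nodup := by
          have := pvAcc1_nodup (C ++ F) (F.flatMap (pvDests t)) [] (by simpa using hnd)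
          exact this
        have hdisj : ∀ x ∈ NX, x ∉ C ++ F := by
          intro x hx
          rcases (pvAcc1_mem _ _ _ _).1 hx with h | ⟨_, h2⟩
          · simp at h
          · exact h2
        have hmemNX : ∀ x ∈ NX, x ∈ F.flatMap (pvDests t) := by
          intro x hx
          rcases (pvAcc1_mem _ _ _ _).1 hx with h | ⟨h1, _⟩
          · simp at h
          · exact h1
        -- B takes one round too
        rw [pvLoopB]
        rw [dif_neg (by
          rw [pvNuevos_eq t C F hclosed, ← hNXdef]
          simpa [List.isEmpty_iff] using hNX)]
        rw [pvNuevos_eq t C F hclosed, ← hNXdef]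
        rw [pvUnion_append NX (C ++ F) (List.Nodup.of_append_right hndNX) hdisj]
        -- apply the induction hypothesis at (C ++ F, NX)
        have hclosed' : ∀ e ∈ C ++ F, ∀ d ∈ pvDests t e, d ∈ (C ++ F) ++ NX := by
          intro e he d hd
          rcases List.mem_append.1 he with he | he
          · exact List.mem_append.2 (Or.inl (hclosed e he d hd))
          · by_cases hdin : d ∈ C ++ F
            · exact List.mem_append.2 (Or.inl hdin)
            · refine List.mem_append.2 (Or.inr ?_)
              rw [hNXdef]
              exact (pvAcc1_mem _ _ _ _).2 (Or.inr ⟨List.mem_flatMap.2 ⟨e, he, hd⟩, hdin⟩)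
        have hcard : ((pvUniv t).toFinset \ ((C ++ F) ++ NX).toFinset).card ≤ k := by
          obtain ⟨x, hx⟩ := List.exists_mem_of_ne_nil _ hNX
          obtain ⟨e, he, hd⟩ := List.mem_flatMap.1 (hmemNX x hx)
          have hxU : x ∈ pvUniv t := pvDests_subset_univ t e x hd
          have hlt : ((pvUniv t).toFinset \ ((C ++ F) ++ NX).toFinset).card
              < ((pvUniv t).toFinset \ (C ++ F).toFinset).card := by
            apply Finset.card_lt_card
            constructor
            · intro y hy
              simp only [Finset.mem_sdiff, List.mem_toFinset, List.mem_append] at hy ⊢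
              exact ⟨hy.1, fun hc => hy.2 (Or.inl hc)⟩
            · intro hsub
              have h1 := hsub (by
                simp only [Finset.mem_sdiff, List.mem_toFinset]
                exact ⟨hxU, hdisj x hx⟩)
              simp only [Finset.mem_sdiff, List.mem_toFinset, List.mem_append] at h1
              exact h1.2 (Or.inr hx)
          omega
        exact ih (C ++ F) NX hcard hndNX hclosed' 

-- ===== VERDICT (by name: the statement is the Claim_ definition above) =====
theorem obtener_estados_accesibles_spec : Claim_equal_obtener_estados_accesibles := by
  intro n t _
  unfold Spec_obtener_estados_accesibles obtener_estados_accesibles obtener_estados_accesibles_alt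
  have h := pvMain t (((pvUniv t).toFinset \ (([] : List Int) ++ [0]).toFinset).card) [] [0]
    le_rfl (by simp) (by simp)
  simpa using h
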